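-- pv_equiv track=rewrite | github.com/svcx650/AdventOfCode2024 | Day2/Day2.py | IsItSafe
-- ===== SOURCE A (Python) =====
-- def IsItSafe(report):
--     levels = [int(i) for i in report.split()]
--     check_inc = []
--     check_dec = []
--
--     # check if decreasing
--     for index, level in enumerate(levels):
--         if index == 0: continue
--         elif levels[index-1] - level in range(1,4):
--             check_dec.append(True)
--         else:
--             check_dec.append(False)
--
--     # check if increasing
--     for index, level in enumerate(levels):
--         if index == 0: continue
--         elif levels[index-1] - level in range (-3,0):
--             check_inc.append(True)
--         else:
--             check_inc.append(False)
--
--     if all(check_inc) or all(check_dec): return True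
--     else: return False
-- ===== SOURCE B (Python) =====
-- def IsItSafe(report):
--     levels = [int(i) for i in report.split()]
--
--     def go(prev, rest, inc, dec):
--         if not rest:
--             return inc or dec
--         d = rest[0] - prev
--         inc = inc and 1 <= d <= 3
--         dec = dec and -3 <= d <= -1
--         if not inc and not dec:
--             return False
--         return go(rest[0], rest[1:], inc, dec)
--
--     return True if not levels else go(levels[0], levels[1:], True, True)
-- ===== Notes on version B (the rewrite author's own statement) =====
-- stated objective: alternative
-- what changed: B makes a single recursive pass that carries two live monotonicity flags (increasing-ok, decreasing-ok) and returns False as soon as both flags die, instead of A's two separate enumerate loops that each build a full boolean table before a final all()/all() check.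
-- outside the precondition, e.g. on IsItSafe('1 a'): A raises ValueError, B raises ValueError
import Mathlib
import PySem

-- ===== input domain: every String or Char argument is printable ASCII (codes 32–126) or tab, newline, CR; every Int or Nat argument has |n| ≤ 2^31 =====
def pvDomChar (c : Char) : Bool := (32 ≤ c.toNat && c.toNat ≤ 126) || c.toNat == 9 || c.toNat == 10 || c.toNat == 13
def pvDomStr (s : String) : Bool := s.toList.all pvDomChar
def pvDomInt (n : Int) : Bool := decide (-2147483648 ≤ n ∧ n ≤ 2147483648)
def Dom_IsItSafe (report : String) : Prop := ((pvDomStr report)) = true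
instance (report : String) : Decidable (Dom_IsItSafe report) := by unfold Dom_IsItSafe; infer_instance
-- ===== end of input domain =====

-- B replaces A's two staged table-building loops by one recursive pass that carries
-- two monotonicity flags and exits early when both die (objective: alternative).

-- ===== PORT A =====
def IsItSafe (report : String) : Bool :=
  match ((PySem.Str.split₀ report).mapM PySem.Int.ofStr?) with
  | none => false   -- int(i) raises ValueError; excluded by Pre_IsItSafe
  | some levels =>
    -- check if decreasing
    let check_dec := (PySem.List.enumerate levels).foldl
      (fun acc p =>
        if p.1 == 0 then acc
        else if (PySem.List.pyRange 1 4 1).contains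
            (PySem.List.pyGetD levels (p.1 - 1) 0 - p.2) then acc ++ [true]
        else acc ++ [false]) []
    -- check if increasing
    let check_inc := (PySem.List.enumerate levels).foldl
      (fun acc p =>
        if p.1 == 0 then acc
        else if (PySem.List.pyRange (-3) 0 1).contains
            (PySem.List.pyGetD levels (p.1 - 1) 0 - p.2) then acc ++ [true]
        else acc ++ [false]) []
    if check_inc.all (fun b => b) || check_dec.all (fun b => b) then true else false

-- ===== PORT B =====
-- inner helper `go` of Source B: one pass, two flags, early exit
def goIsItSafe (prev : Int) (rest : List Int) (inc dec : Bool) : Bool :=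
  match rest with
  | [] => inc || dec
  | x :: xs =>
    let d := x - prev
    let inc' := inc && decide (1 ≤ d ∧ d ≤ 3)
    let dec' := dec && decide (-3 ≤ d ∧ d ≤ -1)
    if !inc' && !dec' then false
    else goIsItSafe x xs inc' dec'

def IsItSafe_alt (report : String) : Bool :=
  match ((PySem.Str.split₀ report).mapM PySem.Int.ofStr?) with
  | none => false   -- int(i) raises ValueError; excluded by Pre_IsItSafe
  | some levels =>
    match levels with
    | [] => true
    | x :: xs => goIsItSafe x xs true true

-- ===== PRECONDITION & SPEC =====
-- Pre_ excludes reports containing a whitespace-separated token that is not a Python int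
-- literal: there int() raises ValueError in A (and in B alike).
def Pre_IsItSafe (report : String) : Prop :=
  (PySem.Str.split₀ report).all (fun t => (PySem.Int.ofStr? t).isSome) = true
instance (report : String) : Decidable (Pre_IsItSafe report) := by unfold Pre_IsItSafe; infer_instance
def pvWitness_IsItSafe : String := "1 2 3"

def Spec_IsItSafe (report : String) (out : Bool) : Prop := out = IsItSafe_alt report
instance (report : String) (out : Bool) : Decidable (Spec_IsItSafe report out) := by unfold Spec_IsItSafe; infer_instance

-- ===== CLAIM (what is proved, stated in full; the proofs are below) =====
def Claim_equal_IsItSafe : Prop := ∀ (report : String), Dom_IsItSafe report → Pre_IsItSafe report → Spec_IsItSafe report (IsItSafe report)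

-- ===== LEMMAS AND PROOFS =====

-- Invariant of A's loop from position k+1 onwards: it appends g over the remaining
-- consecutive pairs of the full list.
theorem loopA_aux (g : Int → Int → Bool) (full : List Int) :
    ∀ (xs : List Int) (k : Nat) (acc : List Bool), full.drop (k + 1) = xs →
    (PySem.List.enumerate xs ((k : Int) + 1)).foldl
      (fun acc p =>
        if p.1 == 0 then acc
        else if g (PySem.List.pyGetD full (p.1 - 1) 0) p.2 then acc ++ [true]
        else acc ++ [false]) acc
    = acc ++ ((full.drop k).zip xs).map (fun p => g p.1 p.2) := by
  intro xs
  induction xs with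
  | nil => intro k acc _; simp [PySem.List.enumerate]
  | cons x xs ih =>
    intro k acc hdrop
    have hk1 : k + 1 < full.length := by
      by_contra hc
      rw [List.drop_eq_nil_of_le (by omega)] at hdrop
      exact List.cons_ne_nil x xs hdrop.symm
    have hk : k < full.length := by omega
    have hdk : full.drop k = full[k] :: (x :: xs) := by
      rw [← hdrop, List.drop_eq_getElem_cons hk]
    have hdk1 : full.drop (k + 1 + 1) = xs := by
      have := congrArg List.tail hdrop
      simpa [← List.drop_one, List.drop_drop] using this
    rw [PySem.List.enumerate_cons, List.foldl_cons]
    have hne : (((k : Int) + 1) == (0 : Int)) = false := by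
      simp only [beq_eq_false_iff_ne, ne_eq]; omega
    rw [if_neg (by simp [hne])]
    have hget : PySem.List.pyGetD full ((k : Int) + 1 - 1) 0 = full[k] := by
      have : ((k : Int) + 1 - 1) = ((k : Nat) : Int) := by omega
      rw [this, PySem.List.pyGetD_natCast, List.getD_eq_getElem?_getD,
        List.getElem?_eq_getElem hk, Option.getD_some]
    have hstep : (if g (PySem.List.pyGetD full ((k : Int) + 1 - 1) 0) x then acc ++ [true]
        else acc ++ [false]) = acc ++ [g full[k] x] := by
      rw [hget]; cases g full[k] x <;> simp
    rw [hstep]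
    have hsucc : ((k : Int) + 1 + 1) = (((k + 1 : Nat) : Int) + 1) := by push_cast; ring
    rw [hsucc, ih (k + 1) (acc ++ [g full[k] x]) hdk1, hdk]
    simp [hdrop]

-- A's skip-index-0 loop over `enumerate levels`, appending the boolean g(levels[i-1], levels[i]),
-- produces exactly the map of g over consecutive pairs.
theorem loopA_eq_zipmap (g : Int → Int → Bool) (levels : List Int) :
    (PySem.List.enumerate levels).foldl
      (fun acc p =>
        if p.1 == 0 then acc
        else if g (PySem.List.pyGetD levels (p.1 - 1) 0) p.2 then acc ++ [true]
        else acc ++ [false]) []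
    = (levels.zip (levels.drop 1)).map (fun p => g p.1 p.2) := by
  cases levels with
  | nil => rfl
  | cons x xs =>
    rw [PySem.List.enumerate_cons]
    simp only [List.foldl_cons, BEq.rfl, if_pos, List.drop_succ_cons, List.drop_zero]
    have h0 : ((0 : Int) + 1) = ((0 : Nat) : Int) + 1 := by norm_num
    rw [h0, loopA_aux g (x :: xs) xs 0 [] (by rfl)]
    rfl

theorem contains_pyRange_inc (a b : Int) :
    (PySem.List.pyRange (-3) 0 1).contains (a - b) = decide (1 ≤ b - a ∧ b - a ≤ 3) := by
  have h : PySem.List.pyRange (-3) 0 1 = [-3, -2, -1] := by decide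
  rw [h, Bool.eq_iff_iff]
  simp only [List.contains_cons, List.contains_nil, Bool.or_false, beq_iff_eq,
    Bool.or_eq_true, decide_eq_true_eq]
  omega

theorem contains_pyRange_dec (a b : Int) :
    (PySem.List.pyRange 1 4 1).contains (a - b) = decide (-3 ≤ b - a ∧ b - a ≤ -1) := by
  have h : PySem.List.pyRange 1 4 1 = [1, 2, 3] := by decide
  rw [h, Bool.eq_iff_iff]
  simp only [List.contains_cons, List.contains_nil, Bool.or_false, beq_iff_eq,
    Bool.or_eq_true, decide_eq_true_eq]
  omega

theorem mapM_isSome_of_all {α β : Type} (f : α → Option β) :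
    ∀ l : List α, (l.all fun t => (f t).isSome) = true → (l.mapM f).isSome = true := by
  intro l hl
  induction l with
  | nil => rfl
  | cons x xs ih =>
    simp only [List.all_cons, Bool.and_eq_true] at hl
    rw [List.mapM_cons]
    rcases Option.isSome_iff_exists.mp hl.1 with ⟨y, hy⟩
    rcases Option.isSome_iff_exists.mp (ih hl.2) with ⟨ys, hys⟩
    simp [hy, hys]

-- B's one-pass two-flag recursion computes the conjunction of each surviving flag with
-- the corresponding all-pairs predicate over the remaining consecutive pairs.
theorem goIsItSafe_eq (prev : Int) (rest : List Int) (inc dec : Bool) :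
    goIsItSafe prev rest inc dec
      = ((inc && ((prev :: rest).zip rest).all (fun p => decide (1 ≤ p.2 - p.1 ∧ p.2 - p.1 ≤ 3)))
        || (dec && ((prev :: rest).zip rest).all (fun p => decide (-3 ≤ p.2 - p.1 ∧ p.2 - p.1 ≤ -1)))) := by
  induction rest generalizing prev inc dec with
  | nil => simp [goIsItSafe]
  | cons x xs ih =>
    unfold goIsItSafe
    simp only [List.zip_cons_cons, List.all_cons]
    by_cases hbf : (!(inc && decide (1 ≤ x - prev ∧ x - prev ≤ 3))
        && !(dec && decide (-3 ≤ x - prev ∧ x - prev ≤ -1))) = true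
    · rw [if_pos hbf]
      simp only [Bool.and_eq_true, Bool.not_eq_true'] at hbf
      rw [← Bool.and_assoc, ← Bool.and_assoc, hbf.1, hbf.2]
      simp
    · rw [if_neg hbf, ih]
      cases inc <;> cases dec <;> simp [Bool.and_assoc]

-- ===== VERDICT (by name: the statement is the Claim_ definition above) =====
theorem IsItSafe_spec : Claim_equal_IsItSafe := by
  unfold Claim_equal_IsItSafe
  intro report _ hpre
  unfold Spec_IsItSafe IsItSafe IsItSafe_alt
  rcases h : (PySem.Str.split₀ report).mapM PySem.Int.ofStr? with _ | levels
  · exact absurd (mapM_isSome_of_all _ _ hpre) (by simp [h])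
  · simp only
    rw [loopA_eq_zipmap (fun a b => (PySem.List.pyRange 1 4 1).contains (a - b)) levels,
        loopA_eq_zipmap (fun a b => (PySem.List.pyRange (-3) 0 1).contains (a - b)) levels]
    cases levels with
    | nil => rfl
    | cons x xs =>
      simp only [goIsItSafe_eq]
      simp only [List.drop_succ_cons, List.drop_zero, List.all_map,
        contains_pyRange_inc, contains_pyRange_dec]
      rw [Bool.eq_iff_iff]
      simp [Function.comp]
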